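-- pv_equiv track=rewrite | github.com/neozhaoliang/pywonderland | src/uniform-tilings/coxeter/coxeter.py | get_latex_words_array
-- ===== SOURCE A (Python) =====
-- def get_latex_words_array(words, symbol=r"s", cols=4):
--     """
--     Convert a list of words to latex format.
--
--     :param cols: number of columns of the output latex array.
--     """
--     def to_latex(word):
--         if len(word) > 0:
--             return "".join(symbol + "_{{{}}}".format(i) for i in word)
--         return "e"
--
--     latex = ""
--     for i, word in enumerate(words):
--         if i > 0 and i % cols == 0:
--             latex += r"\\"
--         latex += to_latex(word)
--         if i % cols != cols - 1:
--             latex += "&"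
--
--     return r"\begin{{array}}{{{}}}{}\end{{array}}".format("l" * cols, latex)
-- ===== SOURCE B (Python) =====
-- def get_latex_words_array(words, symbol=r"s", cols=4):
--     """
--     Convert a list of words to latex format.
--
--     :param cols: number of columns of the output latex array.
--     """
--     def to_latex(word):
--         if word:
--             return "".join("%s_{%d}" % (symbol, i) for i in word)
--         return "e"
--
--     rows = [words[k:k + cols] for k in range(0, len(words), cols)]
--     body = r"\\".join(
--         "".join(to_latex(w) + ("&" if j != cols - 1 else "") for j, w in enumerate(row))
--         for row in rows)
--     return r"\begin{array}{%s}%s\end{array}" % ("l" * cols, body)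
-- ===== Notes on version B (the rewrite author's own statement) =====
-- stated objective: idiomatic
-- what changed: B first chunks the word list into rows of cols words, renders each row by joining its enumerated cells (appending '&' only when the within-row index is not cols-1), and joins rows with \\, instead of A's single flat loop that decides separators from the global index via i % cols.
-- outside the precondition, e.g. on get_latex_words_array([], 's', 0): A returns '\\begin{array}{}\\end{array}', B raises ValueError
import Mathlib
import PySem

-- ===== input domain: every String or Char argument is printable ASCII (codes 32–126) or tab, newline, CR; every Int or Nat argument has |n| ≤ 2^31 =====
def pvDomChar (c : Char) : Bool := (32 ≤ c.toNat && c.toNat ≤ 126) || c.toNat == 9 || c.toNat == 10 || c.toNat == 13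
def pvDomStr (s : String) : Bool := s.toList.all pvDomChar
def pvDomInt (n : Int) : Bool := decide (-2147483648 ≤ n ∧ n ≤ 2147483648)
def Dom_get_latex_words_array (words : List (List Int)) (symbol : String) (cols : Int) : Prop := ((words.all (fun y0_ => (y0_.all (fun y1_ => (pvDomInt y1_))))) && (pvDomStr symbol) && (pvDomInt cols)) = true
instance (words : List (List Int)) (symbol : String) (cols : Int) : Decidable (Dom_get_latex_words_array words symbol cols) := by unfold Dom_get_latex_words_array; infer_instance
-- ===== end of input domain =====

-- B renders the array by chunking the word list into rows and joining enumerated cells per row,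
-- instead of A's flat loop deciding separators from the global index modulo cols (objective: idiomatic).


-- ===== PORT A =====
-- A's inner to_latex: "".join(symbol + "_{{{}}}".format(i) for i in word), or "e" for the empty word
def pvToLatexA (symbol : String) (word : List Int) : String :=
  if word.length > 0 then
    PySem.Str.join "" (word.map (fun i => symbol ++ "_{" ++ PySem.Int.toStr i ++ "}"))
  else "e"

def get_latex_words_array (words : List (List Int)) (symbol : String) (cols : Int) : String :=
  let latex := (PySem.List.enumerate words 0).foldl (fun latex p =>
    let latex := if p.1 > 0 ∧ PySem.Int.mod p.1 cols = 0 then latex ++ "\\\\" else latex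
    let latex := latex ++ pvToLatexA symbol p.2
    if PySem.Int.mod p.1 cols ≠ cols - 1 then latex ++ "&" else latex) ""
  -- "l" * cols ported by hand: Python's str*int is empty for cols ≤ 0, exact here
  "\\begin{array}{" ++ PySem.Str.join "" (List.replicate cols.toNat "l") ++ "}" ++ latex ++ "\\end{array}"

-- ===== PORT B =====
-- B's to_latex: same cell text, truthiness test on the word
def pvToLatexB (symbol : String) (word : List Int) : String :=
  if word ≠ [] then
    PySem.Str.join "" (word.map (fun i => symbol ++ "_{" ++ PySem.Int.toStr i ++ "}"))
  else "e"

-- one row: "".join(to_latex(w) + ("&" if j != cols-1 else "") for j, w in enumerate(row))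
def pvRowStr (symbol : String) (cols : Int) (row : List (List Int)) : String :=
  PySem.Str.join "" ((PySem.List.enumerate row 0).map
    (fun p => pvToLatexB symbol p.2 ++ (if p.1 ≠ cols - 1 then "&" else "")))

def get_latex_words_array_alt (words : List (List Int)) (symbol : String) (cols : Int) : String :=
  let rows := (PySem.List.pyRange 0 words.length cols).map
    (fun k => PySem.List.slice words (some k) (some (k + cols)))
  let body := PySem.Str.join "\\\\" (rows.map (pvRowStr symbol cols))
  -- "l" * cols ported by hand as in port A
  "\\begin{array}{" ++ PySem.Str.join "" (List.replicate cols.toNat "l") ++ "}" ++ body ++ "\\end{array}"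

-- ===== PRECONDITION & SPEC =====
-- Pre_ restricts to the natural domain cols ≥ 1 (a positive number of columns): for cols = 0 with
-- nonempty words A raises ZeroDivisionError; for cols ≤ 0 otherwise A's output (trailing '&' on every
-- cell, an empty column spec) is an artefact of Python's negative modulus and 'l'*cols, outside the
-- function's purpose, and B's chunking by range(0, len, cols) naturally differs or raises there.
def Pre_get_latex_words_array (words : List (List Int)) (symbol : String) (cols : Int) : Prop := 1 ≤ cols
instance (words : List (List Int)) (symbol : String) (cols : Int) : Decidable (Pre_get_latex_words_array words symbol cols) := by unfold Pre_get_latex_words_array; infer_instance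

def pvWitness_get_latex_words_array : List (List Int) × String × Int := ([[1, 2], [], [3]], "s", 2)

def Spec_get_latex_words_array (words : List (List Int)) (symbol : String) (cols : Int) (out : String) : Prop := out = get_latex_words_array_alt words symbol cols
instance (words : List (List Int)) (symbol : String) (cols : Int) (out : String) : Decidable (Spec_get_latex_words_array words symbol cols out) := by unfold Spec_get_latex_words_array; infer_instance

-- ===== CLAIM (what is proved, stated in full; the proofs are below) =====
def Claim_equal_get_latex_words_array : Prop := ∀ (words : List (List Int)) (symbol : String) (cols : Int), Dom_get_latex_words_array words symbol cols → Pre_get_latex_words_array words symbol cols → Spec_get_latex_words_array words symbol cols (get_latex_words_array words symbol cols)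

-- ===== LEMMAS AND PROOFS =====

-- the two to_latex helpers agree
theorem pvToLatex_eq (symbol : String) (word : List Int) : pvToLatexA symbol word = pvToLatexB symbol word := by
  unfold pvToLatexA pvToLatexB
  cases word <;> simp

-- String-level lemmas about PySem.Str.join
theorem pvJoin_nil (s : String) : PySem.Str.join s [] = "" := by
  apply String.toList_inj.mp
  simp [PySem.Str.toList_join, PySem.Chars.join_nil]

theorem pvJoin_singleton (s x : String) : PySem.Str.join s [x] = x := by
  apply String.toList_inj.mp
  simp [PySem.Str.toList_join, PySem.Chars.join_singleton]

theorem pvJoin_cons_cons (s x y : String) (rest : List String) :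
    PySem.Str.join s (x :: y :: rest) = x ++ s ++ PySem.Str.join s (y :: rest) := by
  apply String.toList_inj.mp
  simp only [PySem.Str.toList_join, List.map_cons, String.toList_append]
  rw [PySem.Chars.join_cons_cons]

theorem pvJoinE_cons (x : String) (xs : List String) :
    PySem.Str.join "" (x :: xs) = x ++ PySem.Str.join "" xs := by
  cases xs with
  | nil => rw [pvJoin_singleton, pvJoin_nil, String.append_empty]
  | cons y ys => rw [pvJoin_cons_cons, String.append_empty]

theorem pvJoinE_append (xs ys : List String) :
    PySem.Str.join "" (xs ++ ys) = PySem.Str.join "" xs ++ PySem.Str.join "" ys := by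
  induction xs with
  | nil => simp [pvJoin_nil, String.empty_append]
  | cons x t ih => simp only [List.cons_append, pvJoinE_cons, ih, String.append_assoc]

-- A's loop body as 'acc ++ pvGA (i, word)'
def pvGA (symbol : String) (cols : Int) (p : Int × List Int) : String :=
  (if p.1 > 0 ∧ PySem.Int.mod p.1 cols = 0 then "\\\\" else "") ++
  pvToLatexA symbol p.2 ++
  (if PySem.Int.mod p.1 cols ≠ cols - 1 then "&" else "")

theorem pvFoldl_eq_join (symbol : String) (cols : Int) :
    ∀ (l : List (Int × List Int)) (acc : String),
    l.foldl (fun latex p =>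
      let latex := if p.1 > 0 ∧ PySem.Int.mod p.1 cols = 0 then latex ++ "\\\\" else latex
      let latex := latex ++ pvToLatexA symbol p.2
      if PySem.Int.mod p.1 cols ≠ cols - 1 then latex ++ "&" else latex) acc
    = acc ++ PySem.Str.join "" (l.map (pvGA symbol cols)) := by
  intro l
  induction l with
  | nil => intro acc; simp [pvJoin_nil]
  | cons p t ih =>
      intro acc
      simp only [List.foldl_cons, List.map_cons, pvJoinE_cons]
      rw [ih]
      unfold pvGA
      split_ifs <;>
        simp [String.append_assoc, String.append_empty, String.empty_append]

-- within-row modulus: for 0 <= j < cols, (q*cols + j) % cols = j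
theorem pvMod_row (q j cols : Int) (hc : 0 < cols) (hj0 : 0 ≤ j) (hj : j < cols) :
    PySem.Int.mod (q * cols + j) cols = j := by
  rw [PySem.Int.mod_eq_emod_of_pos hc, show q * cols + j = j + cols * q by ring,
    Int.add_mul_emod_self_left, Int.emod_eq_of_lt hj0 hj]

-- the tail of a row (within-row index >= 1): global cells equal B's local cells
theorem pvRow_tail (symbol : String) (cols : Int) (hc : 0 < cols) (q : Int) :
    ∀ (t : List (List Int)) (j : Int), 1 ≤ j → j + t.length ≤ cols →
    (PySem.List.enumerate t (q * cols + j)).map (pvGA symbol cols)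
      = (PySem.List.enumerate t j).map
          (fun p => pvToLatexB symbol p.2 ++ (if p.1 ≠ cols - 1 then "&" else "")) := by
  intro t
  induction t with
  | nil => intro j _ _; simp [PySem.List.enumerate]
  | cons w t ih =>
      intro j hj1 hjlen
      rw [PySem.List.enumerate_cons, PySem.List.enumerate_cons]
      simp only [List.map_cons]
      have hjc : j < cols := by simp at hjlen; omega
      have hmod : PySem.Int.mod (q * cols + j) cols = j := pvMod_row q j cols hc (by omega) hjc
      rw [show q * cols + j + 1 = q * cols + (j + 1) by ring,
        ih (j + 1) (by omega) (by simp at hjlen ⊢; omega)]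
      congr 1
      unfold pvGA
      rw [hmod, pvToLatex_eq]
      rw [if_neg (fun h => by omega : ¬ (q * cols + j > 0 ∧ j = 0)), String.empty_append]

-- one full row (nonempty, fitting in cols words), starting at global index q*cols
theorem pvRow_full (symbol : String) (cols : Int) (hc : 0 < cols) (q : Int) (hq : 0 ≤ q)
    (r : List (List Int)) (hr : r ≠ []) (hlen : (r.length : Int) ≤ cols) :
    PySem.Str.join "" ((PySem.List.enumerate r (q * cols)).map (pvGA symbol cols))
      = (if q = 0 then "" else "\\\\") ++ pvRowStr symbol cols r := by
  cases r with
  | nil => exact absurd rfl hr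
  | cons w t =>
      rw [PySem.List.enumerate_cons]
      unfold pvRowStr
      rw [PySem.List.enumerate_cons]
      simp only [List.map_cons, pvJoinE_cons]
      have hmod0 : PySem.Int.mod (q * cols) cols = 0 := by
        rw [show q * cols = q * cols + 0 by ring]
        exact pvMod_row q 0 cols hc le_rfl hc
      have htail : (PySem.List.enumerate t (q * cols + 1)).map (pvGA symbol cols)
          = (PySem.List.enumerate t (0 + 1)).map
              (fun p => pvToLatexB symbol p.2 ++ (if p.1 ≠ cols - 1 then "&" else "")) := by
        rw [show (0 : Int) + 1 = 1 by ring]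
        exact pvRow_tail symbol cols hc q t 1 le_rfl (by simp at hlen ⊢; omega)
      rw [htail]
      unfold pvGA
      rw [hmod0, pvToLatex_eq]
      by_cases hq0 : q = 0
      · rw [if_pos hq0, if_neg (by rw [hq0]; simp : ¬ ((q * cols : Int) > 0 ∧ (0 : Int) = 0))]
        simp [String.empty_append, String.append_assoc]
      · have hqpos : (0 : Int) < q := lt_of_le_of_ne hq (Ne.symm hq0)
        rw [if_neg hq0, if_pos ⟨mul_pos hqpos hc, rfl⟩]
        simp [String.append_assoc]

-- pyRange with positive step: cons and shift
theorem pvPyRange_pos_cons (a b s : Int) (hs : 0 < s) (hab : a < b) :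
    PySem.List.pyRange a b s = a :: PySem.List.pyRange (a + s) b s := by
  rw [PySem.List.pyRange_of_pos _ _ hs, PySem.List.pyRange_of_pos _ _ hs]
  have hcnt : ((b - a + s - 1) / s).toNat = ((b - (a + s) + s - 1) / s).toNat + 1 := by
    have h1 : (b - (a + s) + s - 1) / s + 1 = (b - a + s - 1) / s := by
      rw [show b - a + s - 1 = (b - (a + s) + s - 1) + 1 * s by ring,
        Int.add_mul_ediv_right _ _ (by omega : s ≠ 0)]
    have h2 : 0 ≤ (b - (a + s) + s - 1) / s := Int.ediv_nonneg (by omega) (by omega)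
    omega
  rw [if_pos hab, hcnt, List.range_succ_eq_map]
  simp only [List.map_cons, List.map_map, Nat.cast_zero, mul_zero, add_zero]
  by_cases hab2 : a + s < b
  · rw [if_pos hab2]
    congr 1
    apply List.map_congr_left
    intro k _
    simp only [Function.comp_apply]
    push_cast
    ring
  · rw [if_neg hab2]
    have hz : ((b - (a + s) + s - 1) / s).toNat = 0 := by
      have hle : (b - (a + s) + s - 1) / s < 1 := by
        rw [Int.ediv_lt_iff_lt_mul (by omega)]; omega
      omega
    rw [hz]
    simp

theorem pvPyRange_shift (a b s c : Int) (hs : 0 < s) :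
    PySem.List.pyRange (a + c) (b + c) s = (PySem.List.pyRange a b s).map (fun k => k + c) := by
  rw [PySem.List.pyRange_of_pos _ _ hs, PySem.List.pyRange_of_pos _ _ hs]
  rw [show b + c - (a + c) + s - 1 = b - a + s - 1 by ring]
  have hiff : a + c < b + c ↔ a < b := by omega
  simp only [hiff, List.map_map]
  apply List.map_congr_left
  intro k _
  simp only [Function.comp_apply]
  ring

theorem pvPyRange_pos_nil (a b s : Int) (hs : 0 < s) (hab : b ≤ a) :
    PySem.List.pyRange a b s = [] := by
  rw [PySem.List.pyRange_of_pos _ _ hs, if_neg (by omega)]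
  simp

-- the main chunking lemma: A's flat cell sequence from offset q*cols is B's rows joined with \\
theorem pvMain (symbol : String) (cols : Int) (hc : 0 < cols) :
    ∀ (n : Nat) (words : List (List Int)) (q : Int), words.length ≤ n → 0 ≤ q →
    PySem.Str.join "" ((PySem.List.enumerate words (q * cols)).map (pvGA symbol cols))
      = (if q = 0 ∨ words = [] then "" else "\\\\") ++
        PySem.Str.join "\\\\" (((PySem.List.pyRange 0 words.length cols).map
          (fun k => PySem.List.slice words (some k) (some (k + cols)))).map (pvRowStr symbol cols)) := by
  intro n
  induction n with
  | zero =>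
      intro words q hn hq
      have hw : words = [] := List.eq_nil_of_length_eq_zero (by omega)
      subst hw
      simp [PySem.List.enumerate, pvJoin_nil, pvPyRange_pos_nil 0 0 cols hc le_rfl]
  | succ n ih =>
      intro words q hn hq
      by_cases hw : words = []
      · subst hw
        simp [PySem.List.enumerate, pvJoin_nil, pvPyRange_pos_nil 0 0 cols hc le_rfl]
      · have hwl : 0 < words.length := List.length_pos_of_ne_nil hw
        have hcast : ((cols.toNat : Int)) = cols := Int.toNat_of_nonneg (le_of_lt hc)
        have hw0 : (if q = 0 ∨ words = [] then "" else "\\\\") = (if q = 0 then "" else "\\\\") := by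
          simp [hw]
        -- head row of the pyRange
        have hrange : PySem.List.pyRange 0 (words.length) cols
            = 0 :: PySem.List.pyRange cols (words.length) cols := by
          rw [pvPyRange_pos_cons 0 words.length cols hc (by exact_mod_cast hwl), zero_add]
        have hslice0 : PySem.List.slice words (some 0) (some (0 + cols))
            = words.take cols.toNat := by
          rw [zero_add, PySem.List.slice_toNat words le_rfl (le_of_lt hc)]
          simp
        by_cases hfits : (words.length : Int) ≤ cols
        · -- a single (possibly partial) row
          have hrest : PySem.List.pyRange cols (words.length) cols = [] :=
            pvPyRange_pos_nil _ _ _ hc hfits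
          have htake : words.take cols.toNat = words := by
            apply List.take_of_length_le; omega
          rw [hrange, hrest, List.map_cons, List.map_nil, hslice0, htake,
            List.map_cons, List.map_nil, pvJoin_singleton, hw0]
          exact pvRow_full symbol cols hc q hq words hw hfits
        · -- the first full row and the remaining chunks
          push_neg at hfits
          obtain ⟨r, rest, hsplit, hr_def, hrest_def⟩ :
              ∃ r rest, words = r ++ rest ∧ r = words.take cols.toNat ∧ rest = words.drop cols.toNat :=
            ⟨_, _, (List.take_append_drop cols.toNat words).symm, rfl, rfl⟩
          have hrlen : r.length = cols.toNat := by
            rw [hr_def, List.length_take]; omega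
          have hrestlen : (rest.length : Int) = (words.length : Int) - cols := by
            rw [hrest_def, List.length_drop]; push_cast; omega
          have hrne : r ≠ [] := by
            intro h; rw [h] at hrlen; simp at hrlen; omega
          have hrestne : rest ≠ [] := by
            intro h; rw [h] at hrestlen; simp at hrestlen; omega
          have hrestpos : 0 < (rest.length : Int) := by
            exact_mod_cast List.length_pos_of_ne_nil hrestne
          -- LHS: split the enumeration at the first row
          conv_lhs => rw [hsplit]
          rw [PySem.List.enumerate_append, List.map_append, pvJoinE_append]
          have hshiftidx : q * cols + (r.length : Int) = (q + 1) * cols := by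
            rw [hrlen, hcast]; ring
          rw [hshiftidx]
          rw [pvRow_full symbol cols hc q hq r hrne (by rw [hrlen, hcast])]
          have hrest_n : rest.length ≤ n := by
            have : words.length = r.length + rest.length := by rw [hsplit, List.length_append]
            omega
          rw [ih rest (q + 1) hrest_n (by omega)]
          rw [if_neg (by simp [hrestne]; omega : ¬ ((q : Int) + 1 = 0 ∨ rest = []))]
          -- RHS: peel the head chunk and shift the remaining range
          have hshift : PySem.List.pyRange cols (words.length) cols
              = (PySem.List.pyRange 0 (rest.length) cols).map (fun k => k + cols) := by
            rw [← pvPyRange_shift 0 (rest.length) cols cols hc, zero_add]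
            congr 1
            omega
          have hslices : ∀ k ∈ PySem.List.pyRange 0 (rest.length : Int) cols,
              PySem.List.slice words (some (k + cols)) (some (k + cols + cols))
                = PySem.List.slice rest (some k) (some (k + cols)) := by
            intro k hk
            have hk0 : 0 ≤ k := ((PySem.List.mem_pyRange_iff_of_pos hc k).mp hk).1
            rw [PySem.List.slice_toNat words (by omega) (by omega),
              PySem.List.slice_toNat rest hk0 (by omega)]
            rw [hrest_def, List.drop_drop]
            rw [show (k + cols).toNat = cols.toNat + k.toNat by omega]
            congr 1
            omega
          have htailmap : (PySem.List.pyRange cols ((words.length : Int)) cols).map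
                (fun k => PySem.List.slice words (some k) (some (k + cols)))
              = (PySem.List.pyRange 0 ((rest.length : Int)) cols).map
                (fun k => PySem.List.slice rest (some k) (some (k + cols))) := by
            rw [hshift, List.map_map]
            exact List.map_congr_left (fun k hk => by
              simp only [Function.comp_apply]
              exact hslices k hk)
          rw [hrange, List.map_cons, hslice0, ← hr_def, htailmap, List.map_cons]
          -- the remaining chunk list is nonempty: expose a cons for the join
          have hrange2 : PySem.List.pyRange 0 (rest.length : Int) cols
              = 0 :: PySem.List.pyRange cols (rest.length : Int) cols := by
            rw [pvPyRange_pos_cons 0 (rest.length) cols hc hrestpos, zero_add]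
          rw [hrange2, List.map_cons, List.map_cons, pvJoin_cons_cons, hw0]
          simp [String.append_assoc, String.empty_append]

-- ===== VERDICT (by name: the statement is the Claim_ definition above) =====
theorem get_latex_words_array_spec : Claim_equal_get_latex_words_array := by
  intro words symbol cols _ hpre
  unfold Spec_get_latex_words_array get_latex_words_array get_latex_words_array_alt
  have hc : (0 : Int) < cols := hpre
  simp only
  rw [pvFoldl_eq_join, String.empty_append,
    show (0 : Int) = 0 * cols by ring,
    pvMain symbol cols hc words.length words 0 le_rfl le_rfl]
  simp [String.empty_append]
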